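-- pv_equiv track=rewrite | github.com/SeetharamanM/VNBR-Layers_Gaps | app_dash.py | find_gaps_per_layer
-- ===== SOURCE A (Python) =====
-- def merge_intervals(intervals: list[dict]) -> list[dict]:
--     if not intervals:
--         return []
--     sorted_i = sorted(intervals, key=lambda x: x["start"])
--     merged = [dict(sorted_i[0])]
--     for cur in sorted_i[1:]:
--         last = merged[-1]
--         if cur["start"] <= last["end"]:
--             last["end"] = max(last["end"], cur["end"])
--         else:
--             merged.append(dict(cur))
--     return merged
--
-- def find_gaps_per_layer(records: list) -> dict:
--     min_start = min(r["start"] for r in records)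
--     max_end = max(r["end"] for r in records)
--     by_layer: dict = {}
--     for r in records:
--         by_layer.setdefault(r["layer"], []).append({"start": r["start"], "end": r["end"]})
--     result = {}
--     for layer, intervals in by_layer.items():
--         merged = merge_intervals(intervals)
--         gaps = []
--         pos = min_start
--         for seg in merged:
--             if pos < seg["start"]:
--                 gaps.append({"start": pos, "end": seg["start"], "len": seg["start"] - pos})
--             pos = max(pos, seg["end"])
--         if pos < max_end:
--             gaps.append({"start": pos, "end": max_end, "len": max_end - pos})
--         result[layer] = gaps
--     return result
-- ===== SOURCE B (Python) =====
-- def find_gaps_per_layer(records: list) -> dict: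
--     # One prefix-maximum pass + a zip comprehension per layer, instead of building a
--     # merged-segment list of dicts (merge_intervals) and re-scanning it for gaps.
--     min_start = min(r["start"] for r in records)
--     max_end = max(r["end"] for r in records)
--     by_layer: dict = {}
--     for r in records:
--         by_layer.setdefault(r["layer"], []).append((r["start"], r["end"]))
--     result = {}
--     for layer, ivs in by_layer.items():
--         ivs.sort(key=lambda p: p[0])
--         bounds = []
--         cur = min_start
--         for _, e in ivs:
--             bounds.append(cur)
--             cur = max(cur, e)
--         gaps = [{"start": p, "end": s, "len": s - p}
--                 for p, (s, _) in zip(bounds, ivs) if p < s]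
--         if cur < max_end:
--             gaps.append({"start": cur, "end": max_end, "len": max_end - cur})
--         result[layer] = gaps
--     return result
-- ===== Notes on version B (the rewrite author's own statement) =====
-- stated objective: alternative
-- what changed: Eliminates merge_intervals: instead of sorting interval dicts, folding them into an intermediate merged-segment list (with in-place mutation of the last segment) and re-scanning that list for gaps, B sorts each layer's (start, end) tuples once, builds a prefix-maximum bounds array in a single pass and emits the gaps directly with a zip comprehension.
import Mathlib
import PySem

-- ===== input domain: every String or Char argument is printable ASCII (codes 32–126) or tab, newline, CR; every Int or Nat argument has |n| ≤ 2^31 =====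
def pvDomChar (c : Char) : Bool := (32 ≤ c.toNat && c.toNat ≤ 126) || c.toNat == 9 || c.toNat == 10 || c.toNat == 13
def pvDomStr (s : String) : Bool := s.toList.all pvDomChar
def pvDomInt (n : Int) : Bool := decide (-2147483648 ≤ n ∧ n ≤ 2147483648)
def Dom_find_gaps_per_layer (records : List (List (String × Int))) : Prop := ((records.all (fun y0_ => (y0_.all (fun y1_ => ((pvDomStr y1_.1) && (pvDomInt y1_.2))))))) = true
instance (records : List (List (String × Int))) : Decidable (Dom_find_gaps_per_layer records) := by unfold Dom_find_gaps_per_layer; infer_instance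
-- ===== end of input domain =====

-- B changes the per-layer algorithm: instead of merging sorted interval dicts into an intermediate
-- segment list (merge_intervals) and re-scanning it, it computes a prefix-maximum bounds array in
-- one pass and emits the gaps with a zip comprehension (objective: alternative).

-- ===== PORT A =====
-- r[k] for a record dict: first match in the association list; exact because Pre_ requires the key
-- present and the keys without duplicates (a duplicate-key association list represents no Python dict).
def pvGetA (r : List (String × Int)) (k : String) : Int :=
  ((r.find? (fun p => p.1 == k)).map Prod.snd).getD 0

-- the dict literal {"start": s, "end": e}
def pvMkIv (s e : Int) : PySem.Dict String Int :=
  (PySem.Dict.empty.insert "start" s).insert "end" e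

-- getD is exact for x["start"] / x["end"] here: every dict reaching merge_intervals has both keys.
def merge_intervals (intervals : List (PySem.Dict String Int)) : List (PySem.Dict String Int) :=
  match PySem.List.sorted intervals (fun d => d.getD "start" 0) false with
  | [] => []
  | h :: t =>
    t.foldl (fun merged cur =>
      let last := merged.getLastD PySem.Dict.empty
      if cur.getD "start" 0 ≤ last.getD "end" 0 then
        merged.dropLast ++ [last.insert "end" (max (last.getD "end" 0) (cur.getD "end" 0))]
      else merged ++ [cur]) [h]

-- the body of A's per-layer loop (merge, scan for gaps, trailing gap)
def pvGapsA (min_start max_end : Int) (intervals : List (PySem.Dict String Int)) :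
    List (List (String × Int)) :=
  let merged := merge_intervals intervals
  let gp := merged.foldl (fun (gp : List (List (String × Int)) × Int) seg =>
      (if gp.2 < seg.getD "start" 0 then
         gp.1 ++ [[("start", gp.2), ("end", seg.getD "start" 0), ("len", seg.getD "start" 0 - gp.2)]]
       else gp.1,
       max gp.2 (seg.getD "end" 0))) ([], min_start)
  if gp.2 < max_end then gp.1 ++ [[("start", gp.2), ("end", max_end), ("len", max_end - gp.2)]]
  else gp.1

def find_gaps_per_layer (records : List (List (String × Int))) :
    List (Int × List (List (String × Int))) :=
  match PySem.List.min? (records.map (fun r => pvGetA r "start")) (fun x => x),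
        PySem.List.max? (records.map (fun r => pvGetA r "end")) (fun x => x) with
  | some min_start, some max_end =>
    let by_layer : PySem.Dict Int (List (PySem.Dict String Int)) :=
      records.foldl (fun d r =>
        d.modify (pvGetA r "layer") []
          (fun l => l ++ [pvMkIv (pvGetA r "start") (pvGetA r "end")])) PySem.Dict.empty
    let result : PySem.Dict Int (List (List (String × Int))) :=
      by_layer.items.foldl (fun res li => res.insert li.1 (pvGapsA min_start max_end li.2))
        PySem.Dict.empty
    result.items
  | _, _ => []

-- ===== PORT B =====
-- same first-match lookup, duplicated so that the two ports share no definitions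
def pvGetB (r : List (String × Int)) (k : String) : Int :=
  match r.find? (fun p => p.1 == k) with
  | some p => p.2
  | none => 0

-- B's per-layer body: sort, one prefix-maximum pass, then a zip comprehension
def pvGapsB (min_start max_end : Int) (ivs : List (Int × Int)) : List (List (String × Int)) :=
  let ivs' := PySem.List.sorted ivs (fun p => p.1) false
  let bc := ivs'.foldl (fun (bc : List Int × Int) p => (bc.1 ++ [bc.2], max bc.2 p.2)) ([], min_start)
  let gaps := ((bc.1.zip ivs').filter (fun x => x.1 < x.2.1)).map
      (fun x => [("start", x.1), ("end", x.2.1), ("len", x.2.1 - x.1)])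
  if bc.2 < max_end then gaps ++ [[("start", bc.2), ("end", max_end), ("len", max_end - bc.2)]]
  else gaps

def find_gaps_per_layer_alt (records : List (List (String × Int))) :
    List (Int × List (List (String × Int))) :=
  match PySem.List.min? (records.map (fun r => pvGetB r "start")) (fun x => x) with
  | none => []
  | some min_start =>
    match PySem.List.max? (records.map (fun r => pvGetB r "end")) (fun x => x) with
    | none => []
    | some max_end =>
    let by_layer : PySem.Dict Int (List (Int × Int)) :=
      records.foldl (fun d r =>
        d.modify (pvGetB r "layer") []
          (fun l => l ++ [(pvGetB r "start", pvGetB r "end")])) PySem.Dict.empty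
    let result : PySem.Dict Int (List (List (String × Int))) :=
      by_layer.items.foldl (fun res li => res.insert li.1 (pvGapsB min_start max_end li.2))
        PySem.Dict.empty
    result.items

-- ===== PRECONDITION & SPEC =====
-- Pre_ excludes exactly the inputs on which A raises (empty records → ValueError; a record missing
-- one of the keys "start"/"end"/"layer" → KeyError) and duplicate-key association lists, which
-- represent no Python dict (a real dict always yields Nodup keys).
def Pre_find_gaps_per_layer (records : List (List (String × Int))) : Prop :=
  records ≠ [] ∧ ∀ r ∈ records,
    (r.map Prod.fst).Nodup ∧ "start" ∈ r.map Prod.fst ∧ "end" ∈ r.map Prod.fst ∧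
    "layer" ∈ r.map Prod.fst
instance (records : List (List (String × Int))) : Decidable (Pre_find_gaps_per_layer records) := by
  unfold Pre_find_gaps_per_layer; infer_instance

def pvWitness_find_gaps_per_layer : (List (List (String × Int))) :=
  [[("layer", 0), ("start", 0), ("end", 2)], [("layer", 0), ("start", 5), ("end", 7)]]

def Spec_find_gaps_per_layer (records : List (List (String × Int)))
    (out : List (Int × List (List (String × Int)))) : Prop :=
  out = find_gaps_per_layer_alt records
instance (records : List (List (String × Int))) (out : List (Int × List (List (String × Int)))) :
    Decidable (Spec_find_gaps_per_layer records out) := by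
  unfold Spec_find_gaps_per_layer; infer_instance

-- ===== CLAIM (what is proved, stated in full; the proofs are below) =====
def Claim_equal_find_gaps_per_layer : Prop :=
  ∀ (records : List (List (String × Int))), Dom_find_gaps_per_layer records →
    Pre_find_gaps_per_layer records →
    Spec_find_gaps_per_layer records (find_gaps_per_layer records)

-- ===== LEMMAS AND PROOFS =====

-- abstraction of an interval dict to a (start, end) pair
def pvToPair (d : PySem.Dict String Int) : Int × Int := (d.getD "start" 0, d.getD "end" 0)

-- the common reference function: one fused scan over interval pairs, returning (gaps, final pos)
def pvFused : List (Int × Int) → Int → List (List (String × Int)) × Int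
  | [], pos => ([], pos)
  | (s, e) :: r, pos =>
    let rest := pvFused r (max pos e)
    ((if pos < s then [[("start", pos), ("end", s), ("len", s - pos)]] else []) ++ rest.1, rest.2)

-- recursive forms of A's merge loop, on dicts and on pairs
def pvDMerge : PySem.Dict String Int → List (PySem.Dict String Int) → List (PySem.Dict String Int)
  | L, [] => [L]
  | L, c :: t =>
    if c.getD "start" 0 ≤ L.getD "end" 0 then
      pvDMerge (L.insert "end" (max (L.getD "end" 0) (c.getD "end" 0))) t
    else L :: pvDMerge c t

def pvMergeP : Int × Int → List (Int × Int) → List (Int × Int)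
  | L, [] => [L]
  | L, (s, e) :: r => if s ≤ L.2 then pvMergeP (L.1, max L.2 e) r else L :: pvMergeP (s, e) r

theorem pvFused_cons (s e : Int) (r : List (Int × Int)) (pos : Int) :
    pvFused ((s, e) :: r) pos =
      ((if pos < s then [[("start", pos), ("end", s), ("len", s - pos)]] else []) ++
        (pvFused r (max pos e)).1, (pvFused r (max pos e)).2) := rfl

theorem toPair_insert_end (d : PySem.Dict String Int) (v : Int) :
    pvToPair (d.insert "end" v) = (d.getD "start" 0, v) := by
  simp [pvToPair, PySem.Dict.getD_insert]

theorem toPair_mkIv (s e : Int) : pvToPair (pvMkIv s e) = (s, e) := by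
  simp [pvToPair, pvMkIv, PySem.Dict.getD_insert]

theorem pvGetB_eq_pvGetA : pvGetB = pvGetA := by
  funext r k
  unfold pvGetB pvGetA
  cases r.find? (fun p => p.1 == k) <;> simp

-- A's merge loop is the recursion pvDMerge
theorem mergeFold_eq_dmerge : ∀ (t : List (PySem.Dict String Int)) (acc : List (PySem.Dict String Int))
    (L : PySem.Dict String Int),
    t.foldl (fun merged cur =>
      let last := merged.getLastD PySem.Dict.empty
      if cur.getD "start" 0 ≤ last.getD "end" 0 then
        merged.dropLast ++ [last.insert "end" (max (last.getD "end" 0) (cur.getD "end" 0))]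
      else merged ++ [cur]) (acc ++ [L]) = acc ++ pvDMerge L t := by
  intro t
  induction t with
  | nil => intro acc L; simp [pvDMerge]
  | cons c t ih =>
    intro acc L
    simp only [List.foldl_cons, List.getLastD_concat, List.dropLast_concat]
    by_cases h : c.getD "start" 0 ≤ L.getD "end" 0
    · rw [if_pos h, ih, pvDMerge, if_pos h]
    · rw [if_neg h]
      rw [ih (acc ++ [L]) c]
      simp [pvDMerge, h]

theorem map_toPair_dmerge : ∀ (t : List (PySem.Dict String Int)) (L : PySem.Dict String Int),
    (pvDMerge L t).map pvToPair = pvMergeP (pvToPair L) (t.map pvToPair) := by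
  intro t
  induction t with
  | nil => intro L; simp [pvDMerge, pvMergeP]
  | cons c t ih =>
    intro L
    simp only [pvDMerge, List.map_cons]
    by_cases h : c.getD "start" 0 ≤ L.getD "end" 0
    · rw [if_pos h, ih, toPair_insert_end]
      show _ = pvMergeP (pvToPair L) ((pvToPair c) :: t.map pvToPair)
      rw [pvMergeP]
      simp only [pvToPair]
      rw [if_pos h]
    · rw [if_neg h]
      simp only [List.map_cons, ih]
      show _ = pvMergeP (pvToPair L) ((pvToPair c) :: t.map pvToPair)
      rw [pvMergeP]
      simp only [pvToPair]
      rw [if_neg h]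

-- A's gap-scan loop is the fused scan of the abstracted pairs
theorem scanFold_eq_fused : ∀ (M : List (PySem.Dict String Int))
    (acc : List (List (String × Int))) (pos : Int),
    M.foldl (fun (gp : List (List (String × Int)) × Int) seg =>
      (if gp.2 < seg.getD "start" 0 then
         gp.1 ++ [[("start", gp.2), ("end", seg.getD "start" 0), ("len", seg.getD "start" 0 - gp.2)]]
       else gp.1,
       max gp.2 (seg.getD "end" 0))) (acc, pos) =
    (acc ++ (pvFused (M.map pvToPair) pos).1, (pvFused (M.map pvToPair) pos).2) := by
  intro M
  induction M with
  | nil => intro acc pos; simp [pvFused]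
  | cons seg M ih =>
    intro acc pos
    simp only [List.foldl_cons, List.map_cons]
    rw [ih]
    rw [show seg.getD "start" 0 = (pvToPair seg).1 from rfl,
        show seg.getD "end" 0 = (pvToPair seg).2 from rfl]
    rcases hp : pvToPair seg with ⟨s, e⟩
    simp only [pvFused_cons]
    by_cases hg : pos < s
    · simp [hg, List.append_assoc]
    · simp [hg]

-- scanning the merged list equals the fused scan of the unmerged (sorted) list
theorem fused_mergeP : ∀ (r : List (Int × Int)) (L : Int × Int) (pos : Int),
    pvFused (pvMergeP L r) pos = pvFused (L :: r) pos := by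
  intro r
  induction r with
  | nil => intro L pos; obtain ⟨l1, l2⟩ := L; rfl
  | cons p r ih =>
    intro L pos
    obtain ⟨l1, l2⟩ := L
    obtain ⟨s, e⟩ := p
    rw [pvMergeP]
    by_cases h : s ≤ l2
    · rw [if_pos h, ih]
      rw [pvFused_cons, pvFused_cons, pvFused_cons]
      have hng : ¬ (max pos l2 < s) := not_lt.mpr (le_trans h (le_max_right _ _))
      rw [if_neg hng]
      rw [show max (max pos l2) e = max pos (max l2 e) from max_assoc _ _ _]
      simp
    · rw [if_neg h, pvFused_cons, ih]
      conv_rhs => rw [pvFused_cons]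

-- sorting commutes with mapping out the key
theorem insertBy_map {α β : Type} (f : α → β) (bef : α → α → Bool) (bef' : β → β → Bool)
    (h : ∀ a b, bef' (f a) (f b) = bef a b) (x : α) :
    ∀ ys, (PySem.List.insertBy bef x ys).map f = PySem.List.insertBy bef' (f x) (ys.map f) := by
  intro ys
  induction ys with
  | nil => simp [PySem.List.insertBy]
  | cons y ys ih =>
    simp only [PySem.List.insertBy, List.map_cons]
    rw [h]
    by_cases hb : bef x y
    · simp [hb]
    · simp only [hb, if_false, Bool.false_eq_true, List.map_cons]
      rw [ih]

theorem foldl_insertBy_map {α β : Type} (f : α → β) (bef : α → α → Bool) (bef' : β → β → Bool)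
    (h : ∀ a b, bef' (f a) (f b) = bef a b) :
    ∀ (l : List α) (init : List α),
      (l.foldl (fun acc x => PySem.List.insertBy bef x acc) init).map f
        = (l.map f).foldl (fun acc y => PySem.List.insertBy bef' y acc) (init.map f) := by
  intro l
  induction l with
  | nil => intro init; simp
  | cons x l ih =>
    intro init
    simp only [List.foldl_cons, List.map_cons]
    rw [ih, insertBy_map f bef bef' h]

theorem sorted_map_comm {α β : Type} (f : α → β) (key : β → Int) (l : List α) :
    (PySem.List.sorted l (fun a => key (f a)) false).map f =
      PySem.List.sorted (l.map f) key false := by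
  rw [PySem.List.sorted_eq_foldl_insertBy l (fun a => key (f a)),
      PySem.List.sorted_eq_foldl_insertBy (l.map f) key]
  exact foldl_insertBy_map f (fun a b => decide (key (f a) < key (f b)))
    (fun a b => decide (key a < key b)) (fun a b => rfl) l []

-- B's prefix-maximum pass as a recursion, and its agreement with the fused scan
def pvBoundsRec : List (Int × Int) → Int → List Int
  | [], _ => []
  | p :: r, c => c :: pvBoundsRec r (max c p.2)

def pvLastRec : List (Int × Int) → Int → Int
  | [], c => c
  | p :: r, c => pvLastRec r (max c p.2)

theorem boundsFold_eq : ∀ (ivs : List (Int × Int)) (bs : List Int) (cur : Int),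
    ivs.foldl (fun (bc : List Int × Int) p => (bc.1 ++ [bc.2], max bc.2 p.2)) (bs, cur)
      = (bs ++ pvBoundsRec ivs cur, pvLastRec ivs cur) := by
  intro ivs
  induction ivs with
  | nil => intro bs cur; simp [pvBoundsRec, pvLastRec]
  | cons p r ih =>
    intro bs cur
    simp only [List.foldl_cons, ih, pvBoundsRec, pvLastRec, List.append_assoc,
      List.singleton_append]

theorem fused_eq_bounds : ∀ (ivs : List (Int × Int)) (pos : Int),
    pvFused ivs pos =
      ((((pvBoundsRec ivs pos).zip ivs).filter (fun x => x.1 < x.2.1)).map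
        (fun x => [("start", x.1), ("end", x.2.1), ("len", x.2.1 - x.1)]),
       pvLastRec ivs pos) := by
  intro ivs
  induction ivs with
  | nil => intro pos; simp [pvFused, pvBoundsRec, pvLastRec]
  | cons p r ih =>
    intro pos
    obtain ⟨s, e⟩ := p
    rw [pvFused_cons, ih, pvBoundsRec, pvLastRec]
    rw [List.zip_cons_cons, List.filter_cons]
    by_cases hg : pos < s
    · simp [hg]
    · simp [hg]

-- per-layer equivalence
theorem gapsA_eq_gapsB (mn mx : Int) (divs : List (PySem.Dict String Int))
    (pivs : List (Int × Int)) (hmap : divs.map pvToPair = pivs) :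
    pvGapsA mn mx divs = pvGapsB mn mx pivs := by
  have hApair : (merge_intervals divs).foldl (fun (gp : List (List (String × Int)) × Int) seg =>
      (if gp.2 < seg.getD "start" 0 then
         gp.1 ++ [[("start", gp.2), ("end", seg.getD "start" 0), ("len", seg.getD "start" 0 - gp.2)]]
       else gp.1,
       max gp.2 (seg.getD "end" 0))) ([], mn)
      = pvFused (PySem.List.sorted pivs (fun p => p.1) false) mn := by
    cases hD : PySem.List.sorted divs (fun d => d.getD "start" 0) false with
    | nil =>
      have hdivs : divs = [] := (PySem.List.sorted_eq_nil_iff _ _ _).mp hD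
      subst hdivs
      have hpivs : pivs = [] := by simpa using hmap.symm
      subst hpivs
      have : merge_intervals [] = [] := by
        unfold merge_intervals; rw [hD]
      rw [this]
      rw [show PySem.List.sorted ([] : List (Int × Int)) (fun p => p.1) false = [] from
        (PySem.List.sorted_eq_nil_iff _ _ _).mpr rfl]
      simp [pvFused]
    | cons h t =>
      have hmerged : merge_intervals divs = pvDMerge h t := by
        unfold merge_intervals; rw [hD]
        simpa using mergeFold_eq_dmerge t [] h
      rw [hmerged]
      rw [scanFold_eq_fused (pvDMerge h t) [] mn]
      rw [map_toPair_dmerge, fused_mergeP]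
      have hmaps : pvToPair h :: t.map pvToPair = (PySem.List.sorted divs (fun d => d.getD "start" 0) false).map pvToPair := by
        rw [hD, List.map_cons]
      rw [hmaps]
      have hsm : (PySem.List.sorted divs (fun d => d.getD "start" 0) false).map pvToPair
          = PySem.List.sorted (divs.map pvToPair) (fun p => p.1) false :=
        sorted_map_comm pvToPair (fun p => p.1) divs
      rw [hsm, hmap]
      simp
  simp only [pvGapsA, pvGapsB]
  rw [hApair, boundsFold_eq, fused_eq_bounds]
  simp

-- grouping loop: values, keys, key uniqueness
theorem groupFold_getD {ν : Type} (val : List (String × Int) → ν) :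
    ∀ (records : List (List (String × Int))) (d : PySem.Dict Int (List ν)) (c : Int),
    (records.foldl (fun d r =>
        d.modify (pvGetA r "layer") [] (fun l => l ++ [val r])) d).getD c []
      = d.getD c [] ++ (records.filter (fun r => pvGetA r "layer" == c)).map val := by
  intro records
  induction records with
  | nil => intro d c; simp
  | cons r rs ih =>
    intro d c
    simp only [List.foldl_cons, List.filter_cons]
    rw [ih]
    rw [PySem.Dict.getD_modify]
    by_cases h : pvGetA r "layer" = c
    · have hb : (pvGetA r "layer" == c) = true := beq_iff_eq.mpr h
      rw [hb, if_pos h.symm]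
      simp [h]
    · have hb : (pvGetA r "layer" == c) = false := beq_eq_false_iff_ne.mpr h
      rw [hb, if_neg (fun hh => h hh.symm)]
      simp

theorem groupFold_keys {ν : Type} (val : List (String × Int) → ν)
    (records : List (List (String × Int))) (d : PySem.Dict Int (List ν)) :
    (records.foldl (fun d r =>
        d.modify (pvGetA r "layer") [] (fun l => l ++ [val r])) d).keys
      = PySem.Set.update d.keys (records.map (fun r => pvGetA r "layer")) :=
  PySem.Dict.keys_foldl_modify_key records (fun r => pvGetA r "layer") []
    (fun _ r l => l ++ [val r]) d

theorem groupFold_nodup {ν : Type} (val : List (String × Int) → ν)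
    (records : List (List (String × Int))) :
    ((records.foldl (fun d r =>
        d.modify (pvGetA r "layer") [] (fun l => l ++ [val r]))
        (PySem.Dict.empty : PySem.Dict Int (List ν))).keys).Nodup := by
  apply PySem.Dict.nodup_keys_foldl_modify_key records (fun r => pvGetA r "layer") []
    (fun _ r l => l ++ [val r])
  simp [PySem.Dict.keys_empty]

theorem resultFold_items {ν : Type} (g : Int × ν → List (List (String × Int)))
    (l : List (Int × ν)) (hnd : (l.map (fun li => li.1)).Nodup) :
    (l.foldl (fun res li => res.insert li.1 (g li))
        (PySem.Dict.empty : PySem.Dict Int (List (List (String × Int))))).items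
      = l.map (fun li => (li.1, g li)) := by
  have := PySem.Dict.items_foldl_insert_fresh l (fun li => li.1) (fun li => g li)
    PySem.Dict.empty (fun a _ => PySem.Dict.contains_empty _) hnd
  simpa using this

-- the whole dictionaries-of-layers plumbing
theorem outer_eq (records : List (List (String × Int))) (mn mx : Int) :
    ((records.foldl (fun d r =>
        d.modify (pvGetA r "layer") []
          (fun l => l ++ [pvMkIv (pvGetA r "start") (pvGetA r "end")]))
        (PySem.Dict.empty : PySem.Dict Int (List (PySem.Dict String Int)))).items.foldl
      (fun res li => res.insert li.1 (pvGapsA mn mx li.2))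
      (PySem.Dict.empty : PySem.Dict Int (List (List (String × Int))))).items
    = ((records.foldl (fun d r =>
        d.modify (pvGetA r "layer") []
          (fun l => l ++ [(pvGetA r "start", pvGetA r "end")]))
        (PySem.Dict.empty : PySem.Dict Int (List (Int × Int)))).items.foldl
      (fun res li => res.insert li.1 (pvGapsB mn mx li.2))
      (PySem.Dict.empty : PySem.Dict Int (List (List (String × Int))))).items := by
  have ndA := groupFold_nodup (fun r => pvMkIv (pvGetA r "start") (pvGetA r "end")) records
  have ndB := groupFold_nodup (fun r => (pvGetA r "start", pvGetA r "end")) records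
  rw [resultFold_items (fun li => pvGapsA mn mx li.2) _ (by simpa [PySem.Dict.keys] using ndA)]
  rw [resultFold_items (fun li => pvGapsB mn mx li.2) _ (by simpa [PySem.Dict.keys] using ndB)]
  rw [PySem.Dict.items_eq_map_keys _ ndA [], PySem.Dict.items_eq_map_keys _ ndB []]
  rw [groupFold_keys, groupFold_keys]
  rw [List.map_map, List.map_map]
  apply List.map_congr_left
  intro c _
  simp only [Function.comp]
  rw [groupFold_getD, groupFold_getD]
  simp only [PySem.Dict.getD_empty, List.nil_append]
  congr 1
  apply gapsA_eq_gapsB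
  rw [List.map_map]
  apply List.map_congr_left
  intro r _
  exact toPair_mkIv _ _

-- ===== VERDICT (by name: the statement is the Claim_ definition above) =====
theorem find_gaps_per_layer_spec : Claim_equal_find_gaps_per_layer := by
  intro records hDom hPre
  obtain ⟨hne, hrec⟩ := hPre
  unfold Spec_find_gaps_per_layer
  rcases hmin : PySem.List.min? (records.map (fun r => pvGetA r "start")) (fun x => x) with _ | mn
  · rw [PySem.List.min?_eq_none_iff] at hmin
    exact absurd (List.map_eq_nil_iff.mp hmin) hne
  rcases hmax : PySem.List.max? (records.map (fun r => pvGetA r "end")) (fun x => x) with _ | mx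
  · rw [PySem.List.max?_eq_none_iff] at hmax
    exact absurd (List.map_eq_nil_iff.mp hmax) hne
  unfold find_gaps_per_layer find_gaps_per_layer_alt
  rw [pvGetB_eq_pvGetA, hmin, hmax]
  exact outer_eq records mn mx
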